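-- pv_equiv track=rewrite | github.com/mruwnik/raspberry-mcp | src/local_mcp/lib/music.py | parse_list_response
-- ===== SOURCE A (Python) =====
-- def parse_list_response(lines: list[str]) -> list[dict]:
--     """Parse multi-item response (like lsinfo) into list of dicts."""
--     items = []
--     current: dict = {}
--     for line in lines:
--         if ": " in line:
--             key, value = line.split(": ", 1)
--             # New item starts with file/directory/playlist
--             if key in ("file", "directory", "playlist") and current:
--                 items.append(current)
--                 current = {}
--             current[key] = value
--     if current:
--         items.append(current)
--     return items
-- ===== SOURCE B (Python) =====
-- BOUNDARY = ("file", "directory", "playlist")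
--
--
-- def parse_list_response(lines: list[str]) -> list[dict]:
--     """Parse multi-item response (like lsinfo) into list of dicts.
--
--     Two-phase: tokenize every ': '-line into a (key, value) pair, then fold
--     the pairs into raw segments (a new segment opens at every boundary key
--     after the first pair), and finally turn each segment into a dict.
--     """
--     pairs = [tuple(line.split(": ", 1)) for line in lines if ": " in line]
--     groups: list[list[tuple]] = []
--     for key, value in pairs:
--         if key in BOUNDARY and groups:
--             groups.append([(key, value)])
--         elif groups:
--             groups[-1].append((key, value))
--         else:
--             groups = [[(key, value)]]
--     return [dict(g) for g in groups]
-- ===== Notes on version B (the rewrite author's own statement) =====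
-- stated objective: alternative
-- what changed: A's single interleaved loop that splits lines and mutates a current dict is replaced by three phases: tokenize all ': '-lines into (key,value) pairs, fold the pairs into raw segment lists (new segment at each boundary key after the first pair), then convert each segment to a dict at the end.
import Mathlib
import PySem

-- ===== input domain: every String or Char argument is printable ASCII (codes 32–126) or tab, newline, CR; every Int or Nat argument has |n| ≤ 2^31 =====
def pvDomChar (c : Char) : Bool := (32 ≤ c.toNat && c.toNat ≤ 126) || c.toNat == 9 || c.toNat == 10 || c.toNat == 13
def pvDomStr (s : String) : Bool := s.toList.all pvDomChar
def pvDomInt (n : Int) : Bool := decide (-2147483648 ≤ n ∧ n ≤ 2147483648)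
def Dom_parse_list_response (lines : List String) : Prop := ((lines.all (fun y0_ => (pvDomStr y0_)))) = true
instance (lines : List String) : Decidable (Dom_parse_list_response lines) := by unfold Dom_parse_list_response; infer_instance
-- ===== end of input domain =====

-- B replaces A's interleaved split-and-group loop by three phases — tokenize the ": "-lines
-- into pairs, fold the pairs into raw segments, turn each segment into a dict (alternative
-- decomposition, same cost).

-- ===== PORT A =====
-- `key, value = line.split(": ", 1)`: both Pythons apply it only under the `": " in line`
-- guard, where the split has exactly two pieces; the fallback arm is unreachable there.
def pvSplitPair (line : String) : String × String :=
  match PySem.Str.splitMax? line ": " 1 with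
  | some (k :: v :: _) => (k, v)
  | _ => (line, "")

-- the body of A's `for line in lines` loop, on state (items, current)
def pvStepA (st : List (List (String × String)) × PySem.Dict String String) (line : String) :
    List (List (String × String)) × PySem.Dict String String :=
  if PySem.Str.isIn ": " line then
    let kv := pvSplitPair line
    if (kv.1 == "file" || kv.1 == "directory" || kv.1 == "playlist") && !st.2.items.isEmpty then
      (st.1 ++ [st.2.items], (PySem.Dict.empty).insert kv.1 kv.2)
    else
      (st.1, st.2.insert kv.1 kv.2)
  else st

def parse_list_response (lines : List String) : List (List (String × String)) :=
  let st := lines.foldl pvStepA ([], PySem.Dict.empty)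
  if !st.2.items.isEmpty then st.1 ++ [st.2.items] else st.1

-- ===== PORT B =====
def pvBoundary : List String := ["file", "directory", "playlist"]

-- the body of B's `for key, value in pairs` loop, on the list of raw segments
def pvStepG (gs : List (List (String × String))) (kv : String × String) :
    List (List (String × String)) :=
  if pvBoundary.contains kv.1 && !gs.isEmpty then gs ++ [[kv]]
  else if !gs.isEmpty then gs.dropLast ++ [gs.getLastD [] ++ [kv]]
  else [[kv]]

def parse_list_response_alt (lines : List String) : List (List (String × String)) :=
  let pairs := (lines.filter (fun l => PySem.Str.isIn ": " l)).map pvSplitPair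
  let groups := pairs.foldl pvStepG []
  groups.map (fun g => (PySem.Dict.ofList g).items)

-- ===== PRECONDITION & SPEC =====
def Spec_parse_list_response (lines : List String) (out : List (List (String × String))) : Prop := out = parse_list_response_alt lines
instance (lines : List String) (out : List (List (String × String))) : Decidable (Spec_parse_list_response lines out) := by unfold Spec_parse_list_response; infer_instance

-- ===== CLAIM (what is proved, stated in full; the proofs are below) =====
def Claim_equal_parse_list_response : Prop := ∀ (lines : List String), Dom_parse_list_response lines → Spec_parse_list_response lines (parse_list_response lines)

-- ===== LEMMAS AND PROOFS =====

-- A's loop body, re-indexed by the already-split pair (proof-only)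
def pvStepP (st : List (List (String × String)) × PySem.Dict String String) (kv : String × String) :
    List (List (String × String)) × PySem.Dict String String :=
  if (kv.1 == "file" || kv.1 == "directory" || kv.1 == "playlist") && !st.2.items.isEmpty then
    (st.1 ++ [st.2.items], (PySem.Dict.empty).insert kv.1 kv.2)
  else
    (st.1, st.2.insert kv.1 kv.2)

-- A's state abstracted from B's segment list (proof-only)
def pvAbst (gs : List (List (String × String))) :
    List (List (String × String)) × PySem.Dict String String :=
  ((gs.dropLast).map (fun g => (PySem.Dict.ofList g).items), PySem.Dict.ofList (gs.getLastD []))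

-- A's post-loop flush (proof-only)
def pvFinA (st : List (List (String × String)) × PySem.Dict String String) :
    List (List (String × String)) :=
  if !st.2.items.isEmpty then st.1 ++ [st.2.items] else st.1

theorem pv_stepA_eq (st : List (List (String × String)) × PySem.Dict String String)
    (l : String) :
    pvStepA st l = if PySem.Str.isIn ": " l then pvStepP st (pvSplitPair l) else st := rfl

theorem pv_fold_lines (lines : List String)
    (st : List (List (String × String)) × PySem.Dict String String) :
    lines.foldl pvStepA st =
      ((lines.filter (fun l => PySem.Str.isIn ": " l)).map pvSplitPair).foldl pvStepP st := by
  induction lines generalizing st with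
  | nil => rfl
  | cons l rest ih =>
    simp only [List.foldl_cons, List.filter_cons, pv_stepA_eq]
    by_cases h : PySem.Str.isIn ": " l = true
    · rw [if_pos h, if_pos h, List.map_cons, List.foldl_cons, ih]
    · rw [if_neg h, if_neg h, ih]

theorem pv_insert_items_ne_nil (d : PySem.Dict String String) (k v : String) :
    ((d.insert k v).items).isEmpty = false := by
  rcases d with ⟨l⟩
  rcases l with _ | ⟨p, rest⟩
  · simp [PySem.Dict.insert, PySem.Dict.contains]
  · simp only [PySem.Dict.insert]
    split_ifs <;> simp

theorem pv_update_ne_nil (ps : List (String × String)) (d : PySem.Dict String String)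
    (h : (d.items).isEmpty = false) :
    ((List.foldl (fun acc p => acc.insert p.1 p.2) d ps).items).isEmpty = false := by
  induction ps generalizing d with
  | nil => exact h
  | cons p rest ih => exact ih _ (pv_insert_items_ne_nil d p.1 p.2)

theorem pv_ofList_items_ne_nil (g : List (String × String)) (h : g ≠ []) :
    ((PySem.Dict.ofList g).items).isEmpty = false := by
  rcases g with _ | ⟨kv, rest⟩
  · exact absurd rfl h
  · exact pv_update_ne_nil rest _ (pv_insert_items_ne_nil _ kv.1 kv.2)

theorem pv_ofList_singleton (kv : String × String) :
    PySem.Dict.ofList [kv] = (PySem.Dict.empty).insert kv.1 kv.2 := rfl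

theorem pv_ofList_append_pair (g : List (String × String)) (kv : String × String) :
    PySem.Dict.ofList (g ++ [kv]) = (PySem.Dict.ofList g).insert kv.1 kv.2 := by
  simp [PySem.Dict.ofList, PySem.Dict.update]

theorem pv_main (ps : List (String × String)) (gs : List (List (String × String)))
    (hne : ∀ g ∈ gs, g ≠ []) :
    pvFinA (ps.foldl pvStepP (pvAbst gs)) =
      (ps.foldl pvStepG gs).map (fun g => (PySem.Dict.ofList g).items) := by
  induction ps generalizing gs with
  | nil =>
    rcases gs.eq_nil_or_concat with rfl | ⟨init, last, rfl⟩
    · simp [pvFinA, pvAbst, PySem.Dict.ofList, PySem.Dict.update, PySem.Dict.empty]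
    · rw [List.concat_eq_append] at hne ⊢
      have hlast : last ≠ [] := hne last (by simp)
      have hcur : ((PySem.Dict.ofList last).items) ≠ [] := by
        simpa using pv_ofList_items_ne_nil last hlast
      simp [pvFinA, pvAbst, hcur]
  | cons kv ps ih =>
    rcases gs.eq_nil_or_concat with rfl | ⟨init, last, rfl⟩
    · have h1 : pvStepP (pvAbst []) kv = pvAbst [[kv]] := by
        simp [pvStepP, pvAbst, PySem.Dict.ofList, PySem.Dict.update, PySem.Dict.empty]
      have h2 : pvStepG [] kv = [[kv]] := by simp [pvStepG]
      rw [List.foldl_cons, List.foldl_cons, h1, h2]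
      exact ih [[kv]] (by simp)
    · rw [List.concat_eq_append] at hne ⊢
      have hlast : last ≠ [] := hne last (by simp)
      have hcur : ((PySem.Dict.ofList last).items) ≠ [] := by
        simpa using pv_ofList_items_ne_nil last hlast
      by_cases hb : kv.1 = "file" ∨ kv.1 = "directory" ∨ kv.1 = "playlist"
      · -- boundary key on a non-empty segment list: flush, open a fresh segment
        have h1 : pvStepP (pvAbst (init ++ [last])) kv = pvAbst ((init ++ [last]) ++ [[kv]]) := by
          rcases hb with h | h | h <;> simp [pvStepP, pvAbst, h, hcur, pv_ofList_singleton]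
        have h2 : pvStepG (init ++ [last]) kv = (init ++ [last]) ++ [[kv]] := by
          rcases hb with h | h | h <;> simp [pvStepG, pvBoundary, h]
        rw [List.foldl_cons, List.foldl_cons, h1, h2]
        refine ih ((init ++ [last]) ++ [[kv]]) ?_
        intro g hg
        rcases List.mem_append.mp hg with h | h
        · exact hne g h
        · simp at h; simp [h]
      · -- ordinary key: extend the last segment
        push Not at hb
        obtain ⟨hf, hd, hp⟩ := hb
        have h1 : pvStepP (pvAbst (init ++ [last])) kv = pvAbst (init ++ [last ++ [kv]]) := by
          simp [pvStepP, pvAbst, hf, hd, hp, pv_ofList_append_pair]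
        have h2 : pvStepG (init ++ [last]) kv = init ++ [last ++ [kv]] := by
          simp [pvStepG, pvBoundary, hf, hd, hp]
        rw [List.foldl_cons, List.foldl_cons, h1, h2]
        refine ih (init ++ [last ++ [kv]]) ?_
        intro g hg
        rcases List.mem_append.mp hg with h | h
        · exact hne g (by simp [h])
        · simp at h; simp [h]

-- ===== VERDICT (by name: the statement is the Claim_ definition above) =====
theorem parse_list_response_spec : Claim_equal_parse_list_response := by
  intro lines _
  unfold Spec_parse_list_response parse_list_response parse_list_response_alt
  have h0 : (([], PySem.Dict.empty) :
      List (List (String × String)) × PySem.Dict String String) = pvAbst [] := by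
    simp [pvAbst, PySem.Dict.ofList, PySem.Dict.update, PySem.Dict.empty]
  rw [pv_fold_lines, h0]
  exact pv_main _ [] (by simp)
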